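-- pv_equiv track=rewrite | github.com/stereoabuse/codewars | problems/simple_fun_23_square_digits_sequence.py | square_digits_sequence
-- ===== SOURCE A (Python) =====
-- def square_digits_sequence(n):
--     sd_list = [n]
--     while True:
--         num = sum([int(i)**2 for i in list(str(n))])
--         sd_list.append(num)
--         if sd_list.count(num) == 2:
--             return len(sd_list)
--         n = num
-- ===== SOURCE B (Python) =====
-- def square_digits_sequence(n):
--     def ssd(x):
--         return sum(int(d) ** 2 for d in str(x))
--     # Floyd's tortoise-and-hare over f(x) = ssd(x): O(1) extra space.
--     slow, fast = ssd(n), ssd(ssd(n))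
--     while slow != fast:
--         slow = ssd(slow)
--         fast = ssd(ssd(fast))
--     # tail length mu: walk from the start and from the meeting point together
--     mu, p = 0, n
--     while p != slow:
--         p = ssd(p)
--         slow = ssd(slow)
--         mu += 1
--     # cycle length lam: go once around the cycle from p
--     lam, q = 1, ssd(p)
--     while q != p:
--         q = ssd(q)
--         lam += 1
--     return mu + lam + 1
-- ===== Notes on version B (the rewrite author's own statement) =====
-- stated objective: alternative
-- what changed: B replaces A's stored sequence and per-step count() duplicate scan by Floyd's tortoise-and-hare cycle detection: it finds the meeting point of a one-step and a two-step pointer, then computes the tail length mu and cycle length lam and returns mu + lam + 1, using O(1) extra space.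
import Mathlib
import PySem

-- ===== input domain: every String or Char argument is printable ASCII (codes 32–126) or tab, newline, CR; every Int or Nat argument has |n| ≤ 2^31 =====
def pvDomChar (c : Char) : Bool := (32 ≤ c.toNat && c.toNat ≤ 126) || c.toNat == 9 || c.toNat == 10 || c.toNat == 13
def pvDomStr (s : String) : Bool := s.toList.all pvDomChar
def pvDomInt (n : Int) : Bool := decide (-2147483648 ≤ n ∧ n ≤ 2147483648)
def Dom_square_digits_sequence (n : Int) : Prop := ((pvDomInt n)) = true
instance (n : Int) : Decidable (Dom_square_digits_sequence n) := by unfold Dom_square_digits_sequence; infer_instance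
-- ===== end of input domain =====

-- B replaces A's stored sequence with its per-step count() scan by Floyd's
-- tortoise-and-hare cycle detection (tail length mu, cycle length lam, answer
-- mu + lam + 1) in O(1) extra space (objective: alternative; no speed claim).

-- ===== PORT A =====
-- sum([int(i)**2 for i in list(str(n))]); int('-') raises ValueError (excluded by Pre_),
-- modelled by .getD 0 which is exact on the digit characters Pre_ admits.
def pvSsd (n : Int) : Int :=
  (((PySem.Int.toStr n).toList.map
      (fun c => ((PySem.Int.ofStr? (String.ofList [c])).getD 0) ^ 2)).sum)

-- A's 'while True' loop; fuel is only a totality guard (proved never exhausted on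
-- inputs satisfying Dom and Pre_), returning 0 when it runs out.
def pvLoopA (fuel : Nat) (sdList : List Int) (n : Int) : Int :=
  match fuel with
  | 0 => 0
  | f + 1 =>
    let num := pvSsd n
    let l := sdList ++ [num]
    if l.count num = 2 then (l.length : Int) else pvLoopA f l num

def square_digits_sequence (n : Int) : Int := pvLoopA 1000000 [n] n

-- ===== PORT B =====
-- Source B's first loop: advance slow by one ssd step and fast by two until they meet;
-- returns the meeting value.  Fuel is a totality guard (proved never exhausted on
-- inputs satisfying Dom and Pre_).
def pvMeet (fuel : Nat) (slow fast : Int) : Int :=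
  match fuel with
  | 0 => slow
  | f + 1 => if slow = fast then slow else pvMeet f (pvSsd slow) (pvSsd (pvSsd fast))

-- Source B's second loop: walk p from the start and slow from the meeting value until
-- they coincide, counting the tail length mu; returns (p, mu).
def pvTail (fuel : Nat) (p slow : Int) (mu : Int) : Int × Int :=
  match fuel with
  | 0 => (p, mu)
  | f + 1 => if p = slow then (p, mu) else pvTail f (pvSsd p) (pvSsd slow) (mu + 1)

-- Source B's third loop: walk q once around the cycle from p, counting the cycle length lam.
def pvCycle (fuel : Nat) (p q : Int) (lam : Int) : Int :=
  match fuel with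
  | 0 => lam
  | f + 1 => if q = p then lam else pvCycle f p (pvSsd q) (lam + 1)

def square_digits_sequence_alt (n : Int) : Int :=
  let slow := pvMeet 1000000 (pvSsd n) (pvSsd (pvSsd n))
  let pm := pvTail 1000000 n slow 0
  let lam := pvCycle 1000000 pm.1 (pvSsd pm.1) 1
  pm.2 + lam + 1

-- ===== PRECONDITION & SPEC =====
-- Pre_ excludes exactly the negative n, on which Python A raises ValueError (int('-')).
def Pre_square_digits_sequence (n : Int) : Prop := 0 ≤ n
instance (n : Int) : Decidable (Pre_square_digits_sequence n) := by unfold Pre_square_digits_sequence; infer_instance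
def pvWitness_square_digits_sequence : Int := (16)

def Spec_square_digits_sequence (n : Int) (out : Int) : Prop := out = square_digits_sequence_alt n
instance (n : Int) (out : Int) : Decidable (Spec_square_digits_sequence n out) := by unfold Spec_square_digits_sequence; infer_instance

-- ===== CLAIM (what is proved, stated in full; the proofs are below) =====
def Claim_equal_square_digits_sequence : Prop := ∀ (n : Int), Dom_square_digits_sequence n → Pre_square_digits_sequence n → Spec_square_digits_sequence n (square_digits_sequence n)

-- ===== LEMMAS AND PROOFS =====

-- The orbit of n under the square-digit-sum map: pvX n i is the i-th iterate.
def pvX (n : Int) (i : Nat) : Int := pvSsd^[i] n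

theorem pvX_succ (n : Int) (i : Nat) : pvX n (i + 1) = pvSsd (pvX n i) :=
  Function.iterate_succ_apply' pvSsd i n

theorem pvX_add (n : Int) (a b : Nat) : pvX n (a + b) = pvX (pvX n a) b := by
  unfold pvX
  rw [Nat.add_comm, Function.iterate_add_apply]

-- decimal digit characters
def pvDigits : List Char := ['0','1','2','3','4','5','6','7','8','9']

theorem pv_toDigitsCore_mem (f : Nat) : ∀ (m : Nat) (acc : List Char),
    (∀ c ∈ acc, c ∈ pvDigits) → ∀ c ∈ Nat.toDigitsCore 10 f m acc, c ∈ pvDigits := by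
  induction f with
  | zero => intro m acc hacc c hc; simp only [Nat.toDigitsCore] at hc; exact hacc c hc
  | succ f ih =>
    intro m acc hacc c hc
    have hd : (m % 10).digitChar ∈ pvDigits := by
      have h10 : m % 10 < 10 := Nat.mod_lt _ (by norm_num)
      interval_cases h : m % 10 <;> decide
    have hacc' : ∀ d ∈ (m % 10).digitChar :: acc, d ∈ pvDigits := by
      intro d hdm
      rcases List.mem_cons.mp hdm with h | h
      · exact h ▸ hd
      · exact hacc d h
    by_cases h0 : m / 10 = 0
    · simp only [Nat.toDigitsCore, h0, if_pos] at hc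
      exact hacc' c (by simpa using hc)
    · simp only [Nat.toDigitsCore, h0, if_neg, not_false_iff] at hc
      exact ih (m / 10) _ hacc' c hc

theorem pv_toDigits_mem (m : Nat) : ∀ c ∈ Nat.toDigits 10 m, c ∈ pvDigits :=
  pv_toDigitsCore_mem (m + 1) m [] (by intro c hc; cases hc)

theorem pv_term_bound (c : Char) (hc : c ∈ pvDigits) :
    0 ≤ ((PySem.Int.ofStr? (String.ofList [c])).getD 0) ^ 2 ∧
    ((PySem.Int.ofStr? (String.ofList [c])).getD 0) ^ 2 ≤ 81 := by
  fin_cases hc <;> exact ⟨by decide, by decide⟩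

-- pvSsd of a nonnegative integer below 10^e is between 0 and 81*e.
theorem pv_ssd_bound (m : Int) (h0 : 0 ≤ m) (e : Nat) (he : 0 < e) (hm : m.toNat < 10 ^ e) :
    0 ≤ pvSsd m ∧ pvSsd m ≤ 81 * (e : Int) := by
  have hchars : (PySem.Int.toStr m).toList = Nat.toDigits 10 m.toNat := by
    rw [PySem.Int.toList_toStr]
    unfold PySem.Int.toChars
    rw [if_neg (by omega)]
  unfold pvSsd
  rw [hchars]
  set l := (Nat.toDigits 10 m.toNat).map
      (fun c => ((PySem.Int.ofStr? (String.ofList [c])).getD 0) ^ 2) with hl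
  constructor
  · apply List.sum_nonneg
    intro x hx
    obtain ⟨c, hc, rfl⟩ := List.mem_map.mp hx
    exact sq_nonneg _
  · have hle : ∀ x ∈ l, x ≤ (81 : Int) := by
      intro x hx
      obtain ⟨c, hc, rfl⟩ := List.mem_map.mp hx
      exact (pv_term_bound c (pv_toDigits_mem _ c hc)).2
    have h1 := List.sum_le_card_nsmul l 81 hle
    rw [nsmul_eq_mul] at h1
    have hlen : l.length ≤ e := by
      rw [hl, List.length_map]
      exact Nat.toDigits_length 10 m.toNat e he hm
    have : (l.length : Int) ≤ (e : Int) := by exact_mod_cast hlen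
    nlinarith

theorem pv_ssd_S (m : Int) (h0 : 0 ≤ m) (h1 : m ≤ 2147483648) :
    0 ≤ pvSsd m ∧ pvSsd m ≤ 810 := by
  have hm : m.toNat < 10 ^ 10 := by omega
  have h := pv_ssd_bound m h0 10 (by norm_num) hm
  exact ⟨h.1, by have := h.2; omega⟩

theorem pv_x_mem (n : Int) (h0 : 0 ≤ n) (h1 : n ≤ 2147483648) :
    ∀ i, 1 ≤ i → 0 ≤ pvX n i ∧ pvX n i ≤ 810 := by
  intro i hi
  induction i with
  | zero => omega
  | succ j ih =>
    rw [pvX_succ]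
    rcases Nat.eq_zero_or_pos j with hj | hj
    · subst hj; exact pv_ssd_S n h0 h1
    · have h := ih hj
      exact pv_ssd_S _ h.1 (by have := h.2; omega)

-- pigeonhole: the orbit repeats within the first 812 steps
theorem pv_exists_rep (n : Int) (h0 : 0 ≤ n) (h1 : n ≤ 2147483648) :
    ∃ j, j ≤ 812 ∧ 0 < j ∧ ∃ i, i < j ∧ pvX n i = pvX n j := by
  have hmaps : Set.MapsTo (pvX n) ↑(Finset.Icc 1 812) ↑(Finset.Icc (0:Int) 810) := by
    intro k hk
    simp only [Finset.coe_Icc, Set.mem_Icc] at hk ⊢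
    exact pv_x_mem n h0 h1 k hk.1
  have hcard : (Finset.Icc (0:Int) 810).card < (Finset.Icc (1:Nat) 812).card := by
    rw [Int.card_Icc, Nat.card_Icc]
    decide
  obtain ⟨a, ha, b, hb, hab, heq⟩ := Finset.exists_ne_map_eq_of_card_lt_of_maps_to hcard hmaps
  simp only [Finset.mem_Icc] at ha hb
  rcases Nat.lt_or_ge a b with h | h
  · exact ⟨b, hb.2, by omega, a, h, heq⟩
  · have h' : b < a := by omega
    exact ⟨a, ha.2, by omega, b, h', heq.symm⟩

-- minimal witness of a nonempty ℕ-predicate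
theorem pv_nat_min {P : Nat → Prop} (h : ∃ j, P j) :
    ∃ j, P j ∧ ∀ k, k < j → ¬ P k := by
  classical
  exact ⟨Nat.find h, Nat.find_spec h, fun k hk => Nat.find_min h hk⟩

-- first repeat: J ≤ 812, its earlier partner mu, and injectivity below J
theorem pv_exists_Jmu (n : Int) (h0 : 0 ≤ n) (h1 : n ≤ 2147483648) :
    ∃ J mu, mu < J ∧ J ≤ 812 ∧ pvX n J = pvX n mu ∧
      ∀ i j, i < j → j < J → pvX n i ≠ pvX n j := by
  obtain ⟨j0, hj0le, hj0pos, i0, hi0, heq0⟩ := pv_exists_rep n h0 h1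
  obtain ⟨J, hJ, hJmin⟩ := pv_nat_min (P := fun j => ∃ i, i < j ∧ pvX n i = pvX n j)
    ⟨j0, i0, hi0, heq0⟩
  obtain ⟨mu, hmu, hmueq⟩ := hJ
  refine ⟨J, mu, hmu, ?_, hmueq.symm, ?_⟩
  · by_contra hgt
    exact (hJmin j0 (by omega)) ⟨i0, hi0, heq0⟩
  · intro i j hij hjJ heq
    exact hJmin j hjJ ⟨i, hij, heq⟩

-- periodicity with period J - mu from index mu on
theorem pv_per (n : Int) (J mu : Nat) (hmu : mu < J) (heq : pvX n J = pvX n mu) :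
    ∀ k, mu ≤ k → pvX n (k + (J - mu)) = pvX n k := by
  intro k hk
  have h1 : k + (J - mu) = J + (k - mu) := by omega
  have h2 : k = mu + (k - mu) := by omega
  rw [h1, pvX_add, heq, ← pvX_add, ← h2]

theorem pv_per_mult (n : Int) (J mu : Nat) (hmu : mu < J) (heq : pvX n J = pvX n mu) :
    ∀ t k, mu ≤ k → pvX n (k + (J - mu) * t) = pvX n k := by
  intro t
  induction t with
  | zero => intro k hk; simp
  | succ s ih =>
    intro k hk
    have h1 : k + (J - mu) * (s + 1) = (k + (J - mu)) + (J - mu) * s := by ring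
    rw [h1, ih _ (by omega), pv_per n J mu hmu heq k hk]

-- forward characterization: any value collision starts in the cycle and spans a
-- multiple of the period
theorem pv_fwd (n : Int) (J mu : Nat) (hmu : mu < J) (heq : pvX n J = pvX n mu)
    (hinj : ∀ i j, i < j → j < J → pvX n i ≠ pvX n j) :
    ∀ i j, i < j → pvX n i = pvX n j → mu ≤ i ∧ (J - mu) ∣ (j - i) := by
  intro i j hij hxeq
  have hlampos : 0 < J - mu := by omega
  have canon : ∀ k, mu ≤ k →
      pvX n k = pvX n (mu + (k - mu) % (J - mu)) ∧ mu + (k - mu) % (J - mu) < J := by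
    intro k hk
    have hdm := Nat.div_add_mod (k - mu) (J - mu)
    have hrlt : (k - mu) % (J - mu) < J - mu := Nat.mod_lt _ hlampos
    refine ⟨?_, by omega⟩
    have hk2 : k = (mu + (k - mu) % (J - mu)) + (J - mu) * ((k - mu) / (J - mu)) := by omega
    conv_lhs => rw [hk2]
    exact pv_per_mult n J mu hmu heq _ _ (by omega)
  have inj' : ∀ a b, a < J → b < J → pvX n a = pvX n b → a = b := by
    intro a b haJ hbJ hab
    rcases Nat.lt_trichotomy a b with h | h | h
    · exact absurd hab (hinj a b h hbJ)
    · exact h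
    · exact absurd hab.symm (hinj b a h haJ)
  by_cases hiJ : i < J
  · by_cases hjJ : j < J
    · exact absurd hxeq (hinj i j hij hjJ)
    · have hjmu : mu ≤ j := by omega
      obtain ⟨hcj, hcjlt⟩ := canon j hjmu
      have hi_eq : i = mu + (j - mu) % (J - mu) := inj' i _ hiJ hcjlt (hxeq.trans hcj)
      have hdm := Nat.div_add_mod (j - mu) (J - mu)
      exact ⟨by omega, ⟨(j - mu) / (J - mu), by omega⟩⟩
  · have himu : mu ≤ i := by omega
    have hjmu : mu ≤ j := by omega
    obtain ⟨hci, hcilt⟩ := canon i himu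
    obtain ⟨hcj, hcjlt⟩ := canon j hjmu
    have hreq : mu + (i - mu) % (J - mu) = mu + (j - mu) % (J - mu) :=
      inj' _ _ hcilt hcjlt ((hci.symm.trans hxeq).trans hcj)
    have hdi := Nat.div_add_mod (i - mu) (J - mu)
    have hdj := Nat.div_add_mod (j - mu) (J - mu)
    have hC := Nat.mul_sub (J - mu) ((j - mu) / (J - mu)) ((i - mu) / (J - mu))
    exact ⟨by omega, ⟨(j - mu) / (J - mu) - (i - mu) / (J - mu), by omega⟩⟩

-- ===== loop lemmas =====

theorem pv_count_append_two (l : List Int) (num : Int) (h : l.Nodup) :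
    ((l ++ [num]).count num = 2) ↔ num ∈ l := by
  rw [List.count_append]
  simp only [List.count_singleton]
  constructor
  · intro hc
    by_contra hmem
    simp [List.count_eq_zero_of_not_mem hmem] at hc
  · intro hmem
    simp [List.count_eq_one_of_mem h hmem]

theorem pv_loopA_eq (n : Int) (J mu : Nat) (hmu : mu < J) (heq : pvX n J = pvX n mu)
    (hinj : ∀ i j, i < j → j < J → pvX n i ≠ pvX n j) :
    ∀ fuel k, k < J → J - k ≤ fuel →
      pvLoopA fuel ((List.range (k + 1)).map (pvX n)) (pvX n k) = (J : Int) + 1 := by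
  intro fuel
  induction fuel with
  | zero => intro k hk hf; omega
  | succ f ih =>
    intro k hk hf
    have hnodup : ((List.range (k + 1)).map (pvX n)).Nodup := by
      refine List.Nodup.map_on ?_ (List.nodup_range)
      intro a ha b hb hab
      simp only [List.mem_range] at ha hb
      rcases Nat.lt_trichotomy a b with h | h | h
      · exact absurd hab (hinj a b h (by omega))
      · exact h
      · exact absurd hab.symm (hinj b a h (by omega))
    have hmem : pvX n (k + 1) ∈ (List.range (k + 1)).map (pvX n) ↔ k + 1 = J := by
      constructor
      · intro hm
        obtain ⟨i, hi, hieq⟩ := List.mem_map.mp hm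
        simp only [List.mem_range] at hi
        by_contra hne
        exact hinj i (k + 1) hi (by omega) hieq
      · intro hJ
        refine List.mem_map.mpr ⟨mu, ?_, ?_⟩
        · simp only [List.mem_range]; omega
        · rw [hJ, ← heq]
    have hcat : (List.range (k + 1)).map (pvX n) ++ [pvX n (k + 1)]
        = (List.range (k + 2)).map (pvX n) := by
      conv_rhs => rw [show k + 2 = (k + 1) + 1 from rfl, List.range_succ, List.map_append,
        List.map_cons, List.map_nil]
    by_cases hJ1 : k + 1 = J
    · have hcount := (pv_count_append_two _ _ hnodup).mpr (hmem.mpr hJ1)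
      simp only [pvLoopA, ← pvX_succ n k, hcount, if_pos]
      simp only [List.length_append, List.length_map, List.length_range, List.length_cons,
        List.length_nil]
      omega
    · have hcount : ¬ ((((List.range (k + 1)).map (pvX n)) ++ [pvX n (k + 1)]).count (pvX n (k + 1)) = 2) := by
        rw [pv_count_append_two _ _ hnodup]
        intro hm
        exact hJ1 (hmem.mp hm)
      simp only [pvLoopA, ← pvX_succ n k]
      rw [if_neg hcount, hcat]
      exact ih (k + 1) (by omega) (by omega)

theorem pv_meet_eq (n : Int) (M : Nat) (hM1 : 1 ≤ M) (hMeq : pvX n M = pvX n (2 * M))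
    (hMmin : ∀ k, 1 ≤ k → k < M → pvX n k ≠ pvX n (2 * k)) :
    ∀ fuel i, 1 ≤ i → i ≤ M → M - i < fuel →
      pvMeet fuel (pvX n i) (pvX n (2 * i)) = pvX n M := by
  intro fuel
  induction fuel with
  | zero => intro i h1 h2 h3; omega
  | succ f ih =>
    intro i h1 h2 h3
    rcases Nat.eq_or_lt_of_le h2 with hiM | hiM
    · subst hiM
      rw [pvMeet, if_pos hMeq]
    · rw [pvMeet, if_neg (hMmin i h1 hiM)]
      have e1 : pvSsd (pvX n i) = pvX n (i + 1) := (pvX_succ n i).symm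
      have e2 : pvSsd (pvSsd (pvX n (2 * i))) = pvX n (2 * (i + 1)) := by
        rw [← pvX_succ n (2 * i), ← pvX_succ n (2 * i + 1)]
        ring_nf
      rw [e1, e2]
      exact ih (i + 1) (by omega) (by omega) (by omega)

theorem pv_tail_eq (n : Int) (M mu : Nat) (hmueq : pvX n mu = pvX n (mu + M))
    (hmumin : ∀ j, j < mu → pvX n j ≠ pvX n (j + M)) :
    ∀ fuel j, j ≤ mu → mu - j < fuel →
      pvTail fuel (pvX n j) (pvX n (j + M)) (j : Int) = (pvX n mu, (mu : Int)) := by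
  intro fuel
  induction fuel with
  | zero => intro j h1 h2; omega
  | succ f ih =>
    intro j h1 h2
    rcases Nat.eq_or_lt_of_le h1 with hj | hj
    · subst hj
      rw [pvTail, if_pos hmueq]
    · rw [pvTail, if_neg (hmumin j hj)]
      have e1 : pvSsd (pvX n j) = pvX n (j + 1) := (pvX_succ n j).symm
      have e2 : pvSsd (pvX n (j + M)) = pvX n ((j + 1) + M) := by
        rw [← pvX_succ n (j + M)]
        ring_nf
      rw [e1, e2, show (j : Int) + 1 = ((j + 1 : Nat) : Int) by omega]
      exact ih (j + 1) (by omega) (by omega)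

theorem pv_cycle_eq (n : Int) (mu lam : Nat) (hlam : 1 ≤ lam)
    (hleq : pvX n (mu + lam) = pvX n mu)
    (hlmin : ∀ t, 1 ≤ t → t < lam → pvX n (mu + t) ≠ pvX n mu) :
    ∀ fuel t, 1 ≤ t → t ≤ lam → lam - t < fuel →
      pvCycle fuel (pvX n mu) (pvX n (mu + t)) (t : Int) = (lam : Int) := by
  intro fuel
  induction fuel with
  | zero => intro t h1 h2 h3; omega
  | succ f ih =>
    intro t h1 h2 h3
    rcases Nat.eq_or_lt_of_le h2 with ht | ht
    · subst ht
      rw [pvCycle, if_pos hleq]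
    · rw [pvCycle, if_neg (hlmin t h1 ht)]
      have e2 : pvSsd (pvX n (mu + t)) = pvX n (mu + (t + 1)) := by
        rw [← pvX_succ n (mu + t)]
        ring_nf
      rw [e2, show (t : Int) + 1 = ((t + 1 : Nat) : Int) by omega]
      exact ih (t + 1) (by omega) (by omega) (by omega)

-- ===== VERDICT =====

theorem square_digits_sequence_spec : Claim_equal_square_digits_sequence := by
  intro n hdom hpre
  unfold Spec_square_digits_sequence
  unfold Pre_square_digits_sequence at hpre
  have hn2 : n ≤ 2147483648 := by
    unfold Dom_square_digits_sequence pvDomInt at hdom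
    exact (decide_eq_true_eq.mp hdom).2
  obtain ⟨J, mu, hmu, hJ812, heq, hinj⟩ := pv_exists_Jmu n hpre hn2
  have hlampos : 0 < J - mu := by omega
  -- A's side evaluates to J + 1
  have hA : square_digits_sequence n = (J : Int) + 1 := by
    have h0 : ([n] : List Int) = (List.range 1).map (pvX n) := by
      simp [pvX]
    have h1 : n = pvX n 0 := rfl
    unfold square_digits_sequence
    conv_lhs => rw [h0, h1]
    exact pv_loopA_eq n J mu hmu heq hinj 1000000 0 (by omega) (by omega)
  -- the Floyd meeting index M: the first m ≥ 1 with x m = x (2m)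
  have hm0 : 1 ≤ (J - mu) * (mu + 1) ∧
      pvX n ((J - mu) * (mu + 1)) = pvX n (2 * ((J - mu) * (mu + 1))) := by
    refine ⟨by have := Nat.mul_pos hlampos (show 0 < mu + 1 by omega); omega, ?_⟩
    have hmule : mu ≤ (J - mu) * (mu + 1) :=
      calc mu ≤ mu + 1 := by omega
      _ = 1 * (mu + 1) := by omega
      _ ≤ (J - mu) * (mu + 1) := Nat.mul_le_mul (by omega) (by omega)
    have h2m : 2 * ((J - mu) * (mu + 1)) = (J - mu) * (mu + 1) + (J - mu) * (mu + 1) := by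
      ring
    rw [h2m, pv_per_mult n J mu hmu heq (mu + 1) _ hmule]
  obtain ⟨M, hQM, hMmin'⟩ := pv_nat_min (P := fun m => 1 ≤ m ∧ pvX n m = pvX n (2 * m))
    ⟨(J - mu) * (mu + 1), hm0⟩
  obtain ⟨hM1, hMeq⟩ := hQM
  have hMmin : ∀ k, 1 ≤ k → k < M → pvX n k ≠ pvX n (2 * k) := by
    intro k h1k hkM hkeq
    exact hMmin' k hkM ⟨h1k, hkeq⟩
  have hMle : M ≤ 660156 := by
    have hub : (J - mu) * (mu + 1) ≤ 812 * 813 := Nat.mul_le_mul (by omega) (by omega)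
    by_contra hgt
    exact hMmin' ((J - mu) * (mu + 1)) (by omega) hm0
  -- M starts in the cycle and is a multiple of the period
  obtain ⟨hmuM, t, hMt⟩ := pv_fwd n J mu hmu heq hinj M (2 * M) (by omega) hMeq
  have hMt' : M = (J - mu) * t := by omega
  -- the tail loop finds mu
  have hmueq : pvX n mu = pvX n (mu + M) := by
    rw [hMt', pv_per_mult n J mu hmu heq t mu (le_refl mu)]
  have hmumin : ∀ j, j < mu → pvX n j ≠ pvX n (j + M) := by
    intro j hj hjeq
    have := (pv_fwd n J mu hmu heq hinj j (j + M) (by omega) hjeq).1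
    omega
  -- the cycle loop finds lam = J - mu
  have hleq : pvX n (mu + (J - mu)) = pvX n mu := by
    rw [show mu + (J - mu) = J by omega, heq]
  have hlmin : ∀ s, 1 ≤ s → s < J - mu → pvX n (mu + s) ≠ pvX n mu := by
    intro s h1s hsl hseq
    exact hinj mu (mu + s) (by omega) (by omega) hseq.symm
  -- evaluate B's three loops
  have hslow : pvMeet 1000000 (pvSsd n) (pvSsd (pvSsd n)) = pvX n M := by
    have e1 : pvSsd n = pvX n 1 := (pvX_succ n 0).symm
    have e2 : pvSsd (pvSsd n) = pvX n (2 * 1) := by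
      rw [show pvSsd (pvSsd n) = pvSsd (pvSsd (pvX n 0)) from rfl,
        ← pvX_succ n 0, ← pvX_succ n 1]
    rw [e2, e1]
    exact pv_meet_eq n M hM1 hMeq hMmin 1000000 1 (by omega) (by omega) (by omega)
  have htail : pvTail 1000000 n (pvX n M) 0 = (pvX n mu, (mu : Int)) := by
    have h := pv_tail_eq n M mu hmueq hmumin 1000000 0 (by omega) (by omega)
    simpa using h
  have hcyc : pvCycle 1000000 (pvX n mu) (pvSsd (pvX n mu)) 1 = ((J - mu : Nat) : Int) := by
    have h := pv_cycle_eq n mu (J - mu) (by omega) hleq hlmin 1000000 1 (by omega) (by omega)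
      (by omega)
    rw [pvX_succ n mu] at h
    simpa using h
  have hB : square_digits_sequence_alt n = (mu : Int) + ((J - mu : Nat) : Int) + 1 := by
    unfold square_digits_sequence_alt
    simp only [hslow, htail, hcyc]
  rw [hA, hB]
  omega
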